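-- pv_equiv track=rewrite | github.com/magic-YuanTian/Selective-Prompt-Anchoring | obsolete/obsolete/weighted_utils/weighted_text_utils.py | highlight_prompt_in_html
-- ===== SOURCE A (Python) =====
-- def highlight_prompt_in_html(prompt, markers):
--     # Initialize an empty list to collect HTML parts
--     parts = []
--     last_index = 0
--
--     tokens = prompt.split()
--
--     for token, marker in zip(tokens, markers):
--         # Find the start index of the token in the prompt
--         start_index = prompt.find(token, last_index)
--
--         # Add the text before the token (if any) as non-highlighted
--         if start_index > last_index:
--             parts.append(prompt[last_index:start_index])
--
--         # Add the token, highlighted if marker is 'yes'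
--         if marker == 'yes':
--             parts.append(f"<mark>{token}</mark>")
--         else:
--             parts.append(token)
--
--         # Update the last_index to the end of the current token
--         last_index = start_index + len(token)
--
--     # Add any remaining text after the last token
--     if last_index < len(prompt):
--         parts.append(prompt[last_index:])
--
--     # Join all parts into a single HTML string
--     html_output = ''.join(parts)
--
--     # # Display the result as HTML
--     # display(HTML(html_output))
--
--     return html_output
-- ===== SOURCE B (Python) =====
-- def highlight_prompt_in_html(prompt, markers):
--     # Split the prompt into maximal runs of whitespace / non-whitespace chars.
--     pieces = []
--     i, n = 0, len(prompt)
--     while i < n: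
--         j = i
--         ws = prompt[i].isspace()
--         while j < n and prompt[j].isspace() == ws:
--             j += 1
--         pieces.append(prompt[i:j])
--         i = j
--     # One pass: each non-whitespace run consumes the next marker (if any).
--     out = []
--     mi = 0
--     for piece in pieces:
--         if mi < len(markers) and not piece[0].isspace():
--             if markers[mi] == 'yes':
--                 piece = f"<mark>{piece}</mark>"
--             mi += 1
--         out.append(piece)
--     return ''.join(out)
-- ===== Notes on version B (the rewrite author's own statement) =====
-- stated objective: alternative
-- what changed: B drops A's split()/find()/last_index machinery that re-locates each token inside the prompt and instead cuts the prompt once into maximal whitespace/non-whitespace runs, then emits them in a single pass in which each non-whitespace run consumes the next marker.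
import Mathlib
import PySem

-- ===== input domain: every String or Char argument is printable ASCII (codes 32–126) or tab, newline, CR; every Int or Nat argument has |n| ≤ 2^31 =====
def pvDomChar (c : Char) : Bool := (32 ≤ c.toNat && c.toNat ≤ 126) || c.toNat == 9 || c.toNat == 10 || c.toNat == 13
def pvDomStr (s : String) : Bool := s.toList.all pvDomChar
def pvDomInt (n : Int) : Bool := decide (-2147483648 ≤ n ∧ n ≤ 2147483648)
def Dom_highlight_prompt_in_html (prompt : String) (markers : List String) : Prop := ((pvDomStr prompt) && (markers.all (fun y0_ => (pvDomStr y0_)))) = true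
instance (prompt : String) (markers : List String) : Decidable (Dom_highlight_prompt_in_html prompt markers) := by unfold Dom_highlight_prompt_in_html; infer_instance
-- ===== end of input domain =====

-- B replaces A's find/last_index scan with one split of the prompt into maximal
-- whitespace/non-whitespace runs followed by a single marker-consuming pass (objective: alternative).

-- ===== PORT A =====
-- the for-loop over zip(tokens, markers) with state (last_index, parts)
def pvALoop (p : List Char) (pairs : List (List Char × String)) (lastIndex : Int)
    (parts : List (List Char)) : Int × List (List Char) :=
  match pairs with
  | [] => (lastIndex, parts)
  | (token, marker) :: rest =>
    let startIndex := PySem.Chars.findFrom p token lastIndex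
    let parts1 := if startIndex > lastIndex then
        parts ++ [PySem.Chars.slice p (some lastIndex) (some startIndex)] else parts
    let parts2 := if marker == "yes" then
        parts1 ++ [("<mark>".toList ++ token ++ "</mark>".toList)] else parts1 ++ [token]
    pvALoop p rest (startIndex + (token.length : Int)) parts2

def highlight_prompt_in_html (prompt : String) (markers : List String) : String :=
  let p := prompt.toList
  let tokens := PySem.Chars.split₀ p
  let r := pvALoop p (tokens.zip markers) 0 []
  let parts := if r.1 < (p.length : Int) then r.2 ++ [PySem.Chars.slice p (some r.1)] else r.2
  String.ofList parts.flatten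

-- ===== PORT B =====
-- the while-loop cutting the prompt into maximal runs of equal whitespace-ness
def pvRuns : List Char → List (List Char)
  | [] => []
  | c :: tl =>
    let ws := PySem.Chars.isspace c
    ((c :: tl).takeWhile (fun d => PySem.Chars.isspace d == ws)) ::
      pvRuns ((c :: tl).dropWhile (fun d => PySem.Chars.isspace d == ws))
  termination_by cs => cs.length
  decreasing_by
    simp only [List.dropWhile_cons]
    rw [if_pos (by simp)]
    simpa using Nat.lt_succ_of_le (List.length_dropWhile_le _ _)

-- the for-loop over the pieces with the marker index mi (markers consumed from the front)
def pvEmit (pieces : List (List Char)) (ms : List String) : List (List Char) :=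
  match pieces with
  | [] => []
  | piece :: rest =>
    match ms with
    | m :: ms' =>
      if !(PySem.Chars.isspace (piece.headD ' ')) then
        (if m == "yes" then "<mark>".toList ++ piece ++ "</mark>".toList else piece)
          :: pvEmit rest ms'
      else piece :: pvEmit rest (m :: ms')
    | [] => piece :: pvEmit rest []

def highlight_prompt_in_html_alt (prompt : String) (markers : List String) : String :=
  String.ofList ((pvEmit (pvRuns prompt.toList) markers).flatten)

-- ===== PRECONDITION & SPEC =====
def Spec_highlight_prompt_in_html (prompt : String) (markers : List String) (out : String) : Prop := out = highlight_prompt_in_html_alt prompt markers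
instance (prompt : String) (markers : List String) (out : String) : Decidable (Spec_highlight_prompt_in_html prompt markers out) := by unfold Spec_highlight_prompt_in_html; infer_instance

-- ===== CLAIM (what is proved, stated in full; the proofs are below) =====
def Claim_equal_highlight_prompt_in_html : Prop := ∀ (prompt : String) (markers : List String), Dom_highlight_prompt_in_html prompt markers → Spec_highlight_prompt_in_html prompt markers (highlight_prompt_in_html prompt markers)

-- ===== LEMMAS AND PROOFS =====

-- reference form of str.split(): leading spaces skipped, maximal non-space runs collected
def pvW : List Char → List (List Char)
  | [] => []
  | c :: rest =>
    if PySem.Chars.isspace c then pvW rest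
    else ((c :: rest).takeWhile (fun d => !PySem.Chars.isspace d)) ::
         pvW ((c :: rest).dropWhile (fun d => !PySem.Chars.isspace d))
  termination_by cs => cs.length
  decreasing_by
    · simp
    · simp only [List.dropWhile_cons]
      rw [if_pos (by simp_all)]
      simpa using Nat.lt_succ_of_le (List.length_dropWhile_le _ _)

theorem pvGo_eq' (cs : List Char) : ∀ (cur : List Char) (acc : List (List Char)),
    PySem.Chars.split₀.go cs cur acc =
    acc.reverse ++ (if cur = [] then pvW cs
      else (cur.reverse ++ cs.takeWhile (fun d => !PySem.Chars.isspace d)) ::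
           pvW (cs.dropWhile (fun d => !PySem.Chars.isspace d))) := by
  induction cs with
  | nil =>
    intro cur acc
    simp only [PySem.Chars.split₀.go, pvW]
    by_cases h : cur = [] <;> simp [h, pvW]
  | cons c rest ih =>
    intro cur acc
    by_cases hs : PySem.Chars.isspace c
    · by_cases h : cur = []
      · subst h
        simp only [PySem.Chars.split₀.go, hs, if_pos, List.isEmpty_nil]
        rw [ih]
        simp [pvW, hs]
      · simp only [PySem.Chars.split₀.go, hs, if_pos]
        rw [if_neg (by simpa using h), ih]
        simp [h, pvW, hs, List.takeWhile_cons, List.dropWhile_cons]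
    · simp only [PySem.Chars.split₀.go, hs]
      rw [if_neg (by simp [hs]), ih]
      by_cases h : cur = [] <;>
        simp [h, pvW, hs, List.takeWhile_cons, List.dropWhile_cons]

theorem split₀_eq_pvW (cs : List Char) : PySem.Chars.split₀ cs = pvW cs := by
  simp [PySem.Chars.split₀, pvGo_eq']

theorem pvW_nil_all_space (cs : List Char) (h : pvW cs = []) :
    ∀ c ∈ cs, PySem.Chars.isspace c = true := by
  induction cs with
  | nil => simp
  | cons c rest ih =>
    by_cases hs : PySem.Chars.isspace c
    · intro d hd
      rcases List.mem_cons.1 hd with rfl | hd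
      · exact hs
      · exact ih (by simpa [pvW, hs] using h) d hd
    · simp [pvW, hs] at h

theorem pvW_decomp (cs t : List Char) (ts : List (List Char)) (h : pvW cs = t :: ts) :
    ∃ ws rest, cs = ws ++ t ++ rest ∧ (∀ c ∈ ws, PySem.Chars.isspace c = true) ∧ t ≠ [] ∧
      (∀ c ∈ t, PySem.Chars.isspace c = false) ∧
      (rest = [] ∨ ∃ r rs, rest = r :: rs ∧ PySem.Chars.isspace r = true) ∧ pvW rest = ts := by
  induction cs with
  | nil => simp [pvW] at h
  | cons c cs' ih =>
    by_cases hs : PySem.Chars.isspace c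
    · obtain ⟨ws, rest, heq, h2, h3, h4, h5, h6⟩ := ih (by simpa [pvW, hs] using h)
      exact ⟨c :: ws, rest, by simp [heq], by simpa [hs] using h2, h3, h4, h5, h6⟩
    · rw [pvW] at h
      rw [if_neg hs] at h
      obtain ⟨rfl, hts⟩ := List.cons.inj h
      refine ⟨[], (c :: cs').dropWhile (fun d => !PySem.Chars.isspace d), ?_, by simp, ?_, ?_, ?_, hts⟩
      · simpa using (List.takeWhile_append_dropWhile (p := fun d => !PySem.Chars.isspace d) (l := c :: cs')).symm
      · simp [List.takeWhile_cons, hs]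
      · intro d hd
        have := List.mem_takeWhile_imp hd
        simpa using this
      · rcases hr : (c :: cs').dropWhile (fun d => !PySem.Chars.isspace d) with _ | ⟨r, rs⟩
        · exact Or.inl rfl
        · refine Or.inr ⟨r, rs, rfl, ?_⟩
          have := List.head_dropWhile_not (p := fun d => !PySem.Chars.isspace d) (l := c :: cs') (by simp [hr])
          simpa [hr] using this

theorem takeWhile_all {α : Type} (p : α → Bool) (xs ys : List α)
    (hall : ∀ c ∈ xs, p c = true) :
    (xs ++ ys).takeWhile p = xs ++ ys.takeWhile p := by
  induction xs with
  | nil => simp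
  | cons x xs ih =>
    simp [List.takeWhile_cons, hall x (by simp),
      ih (fun c hc => hall c (by simp [hc]))]

theorem dropWhile_all {α : Type} (p : α → Bool) (xs ys : List α)
    (hall : ∀ c ∈ xs, p c = true) :
    (xs ++ ys).dropWhile p = ys.dropWhile p := by
  induction xs with
  | nil => simp
  | cons x xs ih =>
    simp [List.dropWhile_cons, hall x (by simp),
      ih (fun c hc => hall c (by simp [hc]))]

theorem pvRuns_append (b : Bool) (xs ys : List Char) (hne : xs ≠ [])
    (hall : ∀ c ∈ xs, PySem.Chars.isspace c = b)
    (hys : ys = [] ∨ ∃ y ys', ys = y :: ys' ∧ PySem.Chars.isspace y = !b) :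
    pvRuns (xs ++ ys) = xs :: pvRuns ys := by
  rcases xs with _ | ⟨x, xs'⟩
  · exact absurd rfl hne
  · have hx : PySem.Chars.isspace x = b := hall x (by simp)
    have hcons : (x :: xs') ++ ys = x :: (xs' ++ ys) := by simp
    rw [hcons, pvRuns]
    have htk : ∀ c ∈ x :: xs', (PySem.Chars.isspace c == PySem.Chars.isspace x) = true := by
      intro c hc; simp [hall c hc, hx]
    have hys' : ys.takeWhile (fun d => PySem.Chars.isspace d == PySem.Chars.isspace x) = [] := by
      rcases hys with rfl | ⟨y, ys', rfl, hy⟩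
      · rfl
      · simp only [List.takeWhile_cons, hy, hx]
        cases b <;> simp
    have hysd : ys.dropWhile (fun d => PySem.Chars.isspace d == PySem.Chars.isspace x) = ys := by
      rcases hys with rfl | ⟨y, ys', rfl, hy⟩
      · rfl
      · simp only [List.dropWhile_cons, hy, hx]
        cases b <;> simp
    have h1 := takeWhile_all (fun d => PySem.Chars.isspace d == PySem.Chars.isspace x) (x :: xs') ys htk
    have h2 := dropWhile_all (fun d => PySem.Chars.isspace d == PySem.Chars.isspace x) (x :: xs') ys htk
    simp only [List.append_eq] at h1 h2 ⊢
    rw [show x :: (xs' ++ ys) = (x :: xs') ++ ys by simp] at *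
    rw [h1, h2, hys', hysd]
    simp

theorem pvRuns_flatten (cs : List Char) : (pvRuns cs).flatten = cs := by
  induction hn : cs.length using Nat.strong_induction_on generalizing cs with
  | _ n ih =>
    rcases cs with _ | ⟨c, tl⟩
    · simp [pvRuns]
    · rw [pvRuns]
      simp only [List.flatten_cons]
      rw [ih ((List.dropWhile _ (c :: tl)).length) ?_ _ rfl]
      · exact List.takeWhile_append_dropWhile
      · subst hn
        simp only [List.dropWhile_cons]
        rw [if_pos (by simp)]
        simpa using Nat.lt_succ_of_le (List.length_dropWhile_le _ _)

theorem pvEmit_nil_ms (ps : List (List Char)) : pvEmit ps [] = ps := by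
  induction ps with
  | nil => rfl
  | cons p ps ih => simp [pvEmit, ih]

theorem pvFind (ws t rest : List Char) (hws : ∀ c ∈ ws, PySem.Chars.isspace c = true)
    (ht : t ≠ []) (htns : ∀ c ∈ t, PySem.Chars.isspace c = false) :
    PySem.Chars.find (ws ++ t ++ rest) t = (ws.length : Int) := by
  obtain ⟨th, t', rfl⟩ : ∃ a l, t = a :: l := by
    cases t with
    | nil => exact absurd rfl ht
    | cons a l => exact ⟨a, l, rfl⟩
  have hinf : th :: t' <:+: ws ++ th :: t' ++ rest := ⟨ws, rest, by simp⟩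
  have hne : PySem.Chars.find (ws ++ th :: t' ++ rest) (th :: t') ≠ -1 :=
    (PySem.Chars.find_ne_neg_one_iff _ _).2 hinf
  have hge : 0 ≤ PySem.Chars.find (ws ++ th :: t' ++ rest) (th :: t') := by
    have := PySem.Chars.neg_one_le_find (ws ++ th :: t' ++ rest) (th :: t')
    omega
  obtain ⟨hpre, hmin⟩ := PySem.Chars.find_spec (s := ws ++ th :: t' ++ rest) (sub := th :: t') hge
  set j := (PySem.Chars.find (ws ++ th :: t' ++ rest) (th :: t')).toNat with hj
  have hocc : th :: t' <+: (ws ++ th :: t' ++ rest).drop ws.length := by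
    rw [List.append_assoc, List.drop_left]
    exact ⟨rest, by simp⟩
  have hle : j ≤ ws.length := by
    by_contra hlt
    exact hmin ws.length (by omega) hocc
  have hgejl : ws.length ≤ j := by
    by_contra hlt
    push_neg at hlt
    have hdrop : (ws ++ th :: t' ++ rest).drop j = ws.drop j ++ (th :: t' ++ rest) := by
      rw [List.append_assoc, List.drop_append_of_le_length (by omega)]
    rcases hwsd : ws.drop j with _ | ⟨w, ws'⟩
    · have := List.drop_eq_nil_iff.1 hwsd
      omega
    · rw [hdrop, hwsd] at hpre
      obtain ⟨k, hk⟩ := hpre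
      have hhead : th = w := by
        simpa using congrArg (fun l => l.headD ' ') hk
      have hw : PySem.Chars.isspace w = true := by
        apply hws
        exact List.mem_of_mem_drop (l := ws) (i := j) (by rw [hwsd]; simp)
      have hth := htns th (by simp)
      rw [hhead, hw] at hth
      simp at hth
  have : j = ws.length := le_antisymm hle hgejl
  omega

def pvFinish (p : List Char) (r : Int × List (List Char)) : List Char :=
  (if r.1 < (p.length : Int) then r.2 ++ [PySem.Chars.slice p (some r.1)] else r.2).flatten

theorem if_push {b : Type} (c : Prop) [Decidable c] (ps : List b) (x y : b) :
    (if c then ps ++ [x] else ps ++ [y]) = ps ++ [if c then x else y] := by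
  split <;> rfl

theorem pvEmit_cons_token (t : List Char) (R : List (List Char)) (m : String) (ms' : List String)
    (hth : PySem.Chars.isspace (t.headD ' ') = false) :
    pvEmit (t :: R) (m :: ms') =
      (if m == "yes" then "<mark>".toList ++ t ++ "</mark>".toList else t) :: pvEmit R ms' := by
  have hth' : PySem.Chars.isspace (t.head?.getD ' ') = false := by
    rcases t <;> simpa using hth
  simp [pvEmit, hth']

theorem pvEmit_cons_space (piece : List Char) (R : List (List Char)) (ms : List String)
    (h : PySem.Chars.isspace (piece.headD ' ') = true) :
    pvEmit (piece :: R) ms = piece :: pvEmit R ms := by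
  have h' : PySem.Chars.isspace (piece.head?.getD ' ') = true := by
    rcases piece <;> simpa using h
  cases ms <;> simp [pvEmit, h']

theorem pvFinish_done (p : List Char) (k : Nat) (parts : List (List Char))
    (hk : k ≤ p.length) :
    pvFinish p ((k : Int), parts) = parts.flatten ++ p.drop k := by
  unfold pvFinish
  dsimp only
  by_cases h : k < p.length
  · rw [if_pos (by exact_mod_cast h)]
    simp [PySem.Chars.slice_eq_listSlice, PySem.List.slice_from_natCast]
  · rw [if_neg (by push_cast; omega)]
    have : p.drop k = [] := List.drop_eq_nil_iff.2 (by omega)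
    simp [this]

theorem pvMain (n : Nat) : ∀ (cs : List Char), cs.length ≤ n →
    ∀ (p : List Char) (k : Nat) (ms : List String) (parts : List (List Char)),
    k ≤ p.length → p.drop k = cs →
    pvFinish p (pvALoop p ((pvW cs).zip ms) (k : Int) parts) =
      parts.flatten ++ (pvEmit (pvRuns cs) ms).flatten := by
  induction n with
  | zero =>
    intro cs hlen p k ms parts hk hdrop
    have : cs = [] := List.eq_nil_of_length_eq_zero (by omega)
    subst this
    simp only [pvW, List.zip_nil_left, pvALoop, pvRuns, pvEmit, List.flatten_nil, List.append_nil]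
    rw [pvFinish_done p k parts hk, hdrop]
    simp
  | succ n ih =>
    intro cs hlen p k ms parts hk hdrop
    rcases hW : pvW cs with _ | ⟨t, ts⟩
    · -- no tokens: cs is all whitespace
      have hsp := pvW_nil_all_space cs hW
      simp only [List.zip_nil_left, pvALoop]
      rw [pvFinish_done p k parts hk, hdrop]
      rcases cs with _ | ⟨c, tl⟩
      · simp [pvRuns, pvEmit]
      · have hruns : pvRuns (c :: tl) = [c :: tl] := by
          have := pvRuns_append true (c :: tl) [] (by simp) (fun d hd => hsp d hd) (Or.inl rfl)
          simpa [pvRuns] using this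
        rw [hruns, pvEmit_cons_space _ _ _ (by simpa using hsp c (by simp))]
        simp [pvEmit]
    · rcases ms with _ | ⟨m, ms'⟩
      · -- markers exhausted
        simp only [List.zip_nil_right, pvALoop]
        rw [pvFinish_done p k parts hk, hdrop, pvEmit_nil_ms, pvRuns_flatten]
      · obtain ⟨ws, rest, hcs, hws, htne, htns, hrest, hpvrest⟩ := pvW_decomp cs t ts hW
        subst hcs
        have hth : PySem.Chars.isspace (t.headD ' ') = false := by
          rcases t with _ | ⟨th, t'⟩
          · exact absurd rfl htne
          · exact htns th (by simp)
        have hlen2 : p.length - k = ws.length + t.length + rest.length := by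
          have := congrArg List.length hdrop
          simp at this
          omega
        have htpos : 0 < t.length := List.length_pos_iff.2 htne
        have hfind : PySem.Chars.findFrom p t (k : Int) = ((k + ws.length : Nat) : Int) := by
          rw [PySem.Chars.findFrom_natCast p t k hk, hdrop, pvFind ws t rest hws htne htns]
          rw [if_neg (by omega)]
          push_cast; ring
        rw [← hpvrest]
        simp only [List.zip_cons_cons]
        rw [pvALoop]
        simp only [hfind, if_push]
        -- the pre-token gap slice is exactly ws
        have hslice : PySem.Chars.slice p (some (k : Int)) (some ((k + ws.length : Nat) : Int)) = ws := by
          rw [show ((k + ws.length : Nat) : Int) = (k : Int) + (ws.length : Int) by push_cast; ring]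
          rw [PySem.Chars.slice_eq_listSlice, PySem.List.slice_natCast_add, hdrop]
          rw [show ws ++ t ++ rest = ws ++ (t ++ rest) by simp]
          exact List.take_left' rfl
        have hparts1 : (if ((k + ws.length : Nat) : Int) > (k : Int) then
            parts ++ [PySem.Chars.slice p (some (k : Int)) (some ((k + ws.length : Nat) : Int))]
            else parts).flatten = parts.flatten ++ ws := by
          by_cases hwsnil : ws = []
          · subst hwsnil
            rw [if_neg (by simp)]
            simp
          · rw [if_pos (by have : 0 < ws.length := List.length_pos_iff.2 hwsnil; push_cast; omega)]
            rw [hslice]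
            simp
        have hdrop' : p.drop (k + ws.length + t.length) = rest := by
          have h1 : (p.drop k).drop (ws.length + t.length) = rest := by
            rw [hdrop, show ws ++ t ++ rest = (ws ++ t) ++ rest by simp,
                show ws.length + t.length = (ws ++ t).length by simp]
            exact List.drop_left
          rw [List.drop_drop] at h1
          simpa [Nat.add_comm, Nat.add_assoc, Nat.add_left_comm] using h1
        have hlen3 : ws.length + t.length + rest.length ≤ n + 1 := by
          have := hlen
          simp at this
          omega
        have hrec := ih rest (by omega) p (k + ws.length + t.length) ms'
          ((if ((k + ws.length : Nat) : Int) > (k : Int) then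
            parts ++ [PySem.Chars.slice p (some (k : Int)) (some ((k + ws.length : Nat) : Int))]
            else parts) ++ [if (m == "yes") = true then "<mark>".toList ++ t ++ "</mark>".toList else t])
          (by omega) hdrop'
        rw [show ((k + ws.length : Nat) : Int) + (t.length : Int) = ((k + ws.length + t.length : Nat) : Int) by push_cast; ring]
        rw [hrec]
        -- now compute the B side
        have hrunsrest : pvRuns (t ++ rest) = t :: pvRuns rest := by
          apply pvRuns_append false t rest htne htns
          rcases hrest with rfl | ⟨r, rs, rfl, hr⟩
          · exact Or.inl rfl
          · exact Or.inr ⟨r, rs, rfl, by simp [hr]⟩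
        by_cases hwsnil : ws = []
        · subst hwsnil
          simp only [List.nil_append]
          rw [hrunsrest, pvEmit_cons_token t _ m ms' hth]
          rw [List.flatten_cons, List.flatten_append, hparts1]
          simp
        · have hruns : pvRuns (ws ++ t ++ rest) = ws :: t :: pvRuns rest := by
            rw [show ws ++ t ++ rest = ws ++ (t ++ rest) by simp]
            rw [pvRuns_append true ws (t ++ rest) hwsnil hws ?_, hrunsrest]
            rcases t with _ | ⟨th, t'⟩
            · exact absurd rfl htne
            · exact Or.inr ⟨th, t' ++ rest, by simp, by simpa using htns th (by simp)⟩
          rw [hruns]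
          have hwshead : PySem.Chars.isspace (ws.headD ' ') = true := by
            rcases ws with _ | ⟨w, ws'⟩
            · exact absurd rfl hwsnil
            · exact hws w (by simp)
          rw [pvEmit_cons_space _ _ _ hwshead, pvEmit_cons_token t _ m ms' hth]
          rw [List.flatten_cons, List.flatten_cons, List.flatten_append, hparts1]
          simp

-- ===== VERDICT (by name: the statement is the Claim_ definition above) =====
theorem highlight_prompt_in_html_spec : Claim_equal_highlight_prompt_in_html := by
  intro prompt markers _
  unfold Spec_highlight_prompt_in_html highlight_prompt_in_html highlight_prompt_in_html_alt
  have h := pvMain prompt.toList.length prompt.toList le_rfl prompt.toList 0 markers []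
    (Nat.zero_le _) (by simp)
  simp only [split₀_eq_pvW]
  simpa [pvFinish] using congrArg String.ofList h
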